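-- pv_equiv track=rewrite | github.com/eonr/ShowSegmentation | final_usable_code/show_utils.py | addEmptyFaces
-- ===== SOURCE A (Python) =====
-- def addEmptyFaces(faces, skip_seconds=1):
--     """Modifies faces dict to include timestamps where no faces are present
--        '-1' is the value assigned to these.
--        :skip_gap: 'interval' parameter given in file2encoding() function (in seconds)"""
--     min_time = (faces[0][0])
--     max_time = (faces[-1][0])
--     curr_time = min_time
--     faces_empty = []
--     counter = 0
--
--     while (curr_time < max_time):
--         if((faces[counter][0]) > curr_time): #No face found at this time
--             faces_empty.append(((curr_time), '-1'))
--         else:                              #Face was already marked at this time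
--             faces_empty.append(faces[counter])
--             counter+=1
--         curr_time += skip_seconds
--     return faces_empty
-- ===== SOURCE B (Python) =====
-- def addEmptyFaces(faces, skip_seconds=1):
--     """Fill gaps between face timestamps with (t, '-1') placeholders.
--        Outer loop over the faces themselves; an inner loop fills the gap
--        before each face, advancing a running clock."""
--     min_time = faces[0][0]
--     max_time = faces[-1][0]
--     out = []
--     curr = min_time
--     for face in faces:
--         while curr < max_time and face[0] > curr:
--             out.append((curr, '-1'))
--             curr += skip_seconds
--         if curr < max_time:
--             out.append(face)
--             curr += skip_seconds
--         else:
--             break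
--     return out
-- ===== Notes on version B (the rewrite author's own statement) =====
-- stated objective: alternative
-- what changed: Inverts the loop structure: instead of one while-loop over the time grid with a counter indexing into faces, B iterates over the faces list itself and fills each gap with an inner placeholder loop over the running clock.
import Mathlib
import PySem

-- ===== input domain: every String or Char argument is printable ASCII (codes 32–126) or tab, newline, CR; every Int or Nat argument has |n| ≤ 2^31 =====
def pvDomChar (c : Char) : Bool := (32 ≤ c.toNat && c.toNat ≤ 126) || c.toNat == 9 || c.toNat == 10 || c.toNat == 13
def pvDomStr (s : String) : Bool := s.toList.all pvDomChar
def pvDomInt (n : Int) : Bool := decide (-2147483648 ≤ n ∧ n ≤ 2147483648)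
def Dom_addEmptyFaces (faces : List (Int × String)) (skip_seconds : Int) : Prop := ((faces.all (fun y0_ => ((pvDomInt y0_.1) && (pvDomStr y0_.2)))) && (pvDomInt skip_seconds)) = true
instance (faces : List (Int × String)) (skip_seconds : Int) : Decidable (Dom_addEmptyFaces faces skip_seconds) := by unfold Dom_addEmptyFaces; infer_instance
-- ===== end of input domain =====

-- B inverts the loop structure (outer loop over faces, inner gap-filling loop) instead of
-- A's single time-grid loop with a counter into faces; same return value on Pre_.


-- ===== PORT A =====
-- A's while-loop over the time grid; counter indexes into faces.
-- The '0 < skip' conjunct and the 'none' fallback are totality guards only: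
-- under Pre_ the Python loop terminates and never indexes past the list.
def portALoop (faces : List (Int × String)) (maxT skip : Int)
    (curr : Int) (counter : Nat) : List (Int × String) :=
  if _h : curr < maxT ∧ 0 < skip then
    match PySem.List.pyGet? faces (counter : Int) with
    | none => []   -- Python would raise IndexError here (unreachable under Pre_)
    | some f =>
      if f.1 > curr then
        (curr, "-1") :: portALoop faces maxT skip (curr + skip) counter
      else
        f :: portALoop faces maxT skip (curr + skip) (counter + 1)
  else []
termination_by (maxT - curr).toNat
decreasing_by all_goals omega

def addEmptyFaces (faces : List (Int × String)) (skip_seconds : Int) : List (Int × String) :=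
  match PySem.List.pyGet? faces 0, PySem.List.pyGet? faces (-1) with
  | some f0, some fl => portALoop faces fl.1 skip_seconds f0.1 0
  | _, _ => []   -- Python raises IndexError on empty faces (excluded by Pre_)

-- ===== PORT B =====
-- inner while-loop: emit placeholders while curr < maxT and the face is still ahead;
-- returns the placeholders and the final clock.  '0 < skip' is a totality guard only.
def portBGap (maxT skip faceT curr : Int) : List (Int × String) × Int :=
  if _h : curr < maxT ∧ faceT > curr ∧ 0 < skip then
    let r := portBGap maxT skip faceT (curr + skip)
    ((curr, "-1") :: r.1, r.2)
  else ([], curr)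
termination_by (maxT - curr).toNat
decreasing_by omega

-- outer for-loop over the faces list with running clock curr
def portBMain (maxT skip : Int) : List (Int × String) → Int → List (Int × String)
  | [], _ => []
  | f :: rest, curr =>
    let r := portBGap maxT skip f.1 curr
    if r.2 < maxT then r.1 ++ f :: portBMain maxT skip rest (r.2 + skip)
    else r.1

def addEmptyFaces_alt (faces : List (Int × String)) (skip_seconds : Int) : List (Int × String) :=
  match PySem.List.pyGet? faces 0 with
  | none => []   -- Python raises IndexError on empty faces (excluded by Pre_)
  | some f0 =>
    match PySem.List.pyGet? faces (-1) with
    | none => []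
    | some fl => portBMain fl.1 skip_seconds faces f0.1

-- ===== PRECONDITION & SPEC =====
-- Pre_ excludes the empty list (A raises IndexError) and non-positive skip_seconds when
-- faces[0][0] < faces[-1][0] (A's while-loop never terminates there).
def Pre_addEmptyFaces (faces : List (Int × String)) (skip_seconds : Int) : Prop :=
  faces ≠ [] ∧
  (0 < skip_seconds ∨ ((faces.getLastD (0, "")).1 ≤ (faces.headD (0, "")).1))
instance (faces : List (Int × String)) (skip_seconds : Int) : Decidable (Pre_addEmptyFaces faces skip_seconds) := by unfold Pre_addEmptyFaces; infer_instance

def pvWitness_addEmptyFaces : (List (Int × String)) × Int := ([(0, "a"), (3, "b")], 1)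

def Spec_addEmptyFaces (faces : List (Int × String)) (skip_seconds : Int) (out : List (Int × String)) : Prop := out = addEmptyFaces_alt faces skip_seconds
instance (faces : List (Int × String)) (skip_seconds : Int) (out : List (Int × String)) : Decidable (Spec_addEmptyFaces faces skip_seconds out) := by unfold Spec_addEmptyFaces; infer_instance

-- ===== CLAIM (what is proved, stated in full; the proofs are below) =====
def Claim_equal_addEmptyFaces : Prop := ∀ (faces : List (Int × String)) (skip_seconds : Int), Dom_addEmptyFaces faces skip_seconds → Pre_addEmptyFaces faces skip_seconds → Spec_addEmptyFaces faces skip_seconds (addEmptyFaces faces skip_seconds)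

-- ===== LEMMAS AND PROOFS =====

theorem pyGet?_eq_drop_head? (faces : List (Int × String)) (counter : Nat) :
    PySem.List.pyGet? faces (counter : Int) = (faces.drop counter).head? := by
  rw [PySem.List.pyGet?_natCast, List.head?_drop]

-- B's outer step unfolds to one placeholder when the gap loop fires
theorem mainB_gap_step (maxT skip : Int) (f : Int × String) (rest : List (Int × String))
    (curr : Int) (h : curr < maxT ∧ f.1 > curr ∧ 0 < skip) :
    portBMain maxT skip (f :: rest) curr =
      (curr, "-1") :: portBMain maxT skip (f :: rest) (curr + skip) := by
  conv_lhs => rw [portBMain]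
  conv_rhs => rw [portBMain]
  rw [portBGap.eq_def, dif_pos h]
  simp only []
  split <;> rfl

-- main invariant: A's loop from (curr, counter) equals B's outer loop on the suffix
theorem loopA_eq_mainB (faces : List (Int × String)) (maxT skip : Int) (hskip : 0 < skip) :
    ∀ n curr counter, (maxT - curr).toNat ≤ n →
      portALoop faces maxT skip curr counter =
        portBMain maxT skip (faces.drop counter) curr := by
  intro n
  induction n with
  | zero =>
    intro curr counter hn
    have hcm : ¬ curr < maxT := by omega
    rw [portALoop.eq_def, dif_neg (by omega)]
    cases hd : faces.drop counter with
    | nil => rw [portBMain]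
    | cons f rest =>
      rw [portBMain]
      rw [portBGap.eq_def, dif_neg (by omega)]
      simp [hcm]
  | succ n ih =>
    intro curr counter hn
    by_cases hcm : curr < maxT
    · rw [portALoop.eq_def, dif_pos (by exact ⟨hcm, hskip⟩), pyGet?_eq_drop_head?]
      cases hd : faces.drop counter with
      | nil => rw [portBMain]; rfl
      | cons f rest =>
        simp only [List.head?]
        by_cases hf : f.1 > curr
        · rw [if_pos hf, mainB_gap_step maxT skip f rest curr ⟨hcm, hf, hskip⟩]
          rw [ih (curr + skip) counter (by omega), hd]
        · rw [if_neg hf]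
          rw [portBMain]
          rw [portBGap.eq_def, dif_neg (by omega)]
          simp only [if_pos hcm, List.nil_append]
          have hrest : rest = faces.drop (counter + 1) := by
            rw [← List.tail_drop, hd]
            rfl
          rw [ih (curr + skip) (counter + 1) (by omega), hrest]
    · rw [portALoop.eq_def, dif_neg (by omega)]
      cases hd : faces.drop counter with
      | nil => rw [portBMain]
      | cons f rest =>
        rw [portBMain]
        rw [portBGap.eq_def, dif_neg (by omega)]
        simp [hcm]

-- ===== VERDICT (by name: the statement is the Claim_ definition above) =====
theorem addEmptyFaces_spec : Claim_equal_addEmptyFaces := by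
  intro faces skip hdom hpre
  unfold Spec_addEmptyFaces addEmptyFaces addEmptyFaces_alt
  obtain ⟨hne, hcase⟩ := hpre
  obtain ⟨f0, faces', rfl⟩ : ∃ f0 fs, faces = f0 :: fs := by
    cases faces with
    | nil => exact absurd rfl hne
    | cons a b => exact ⟨a, b, rfl⟩
  have h0 : PySem.List.pyGet? (f0 :: faces') 0 = some f0 :=
    PySem.List.pyGet?_zero_cons _ _
  have hl : PySem.List.pyGet? (f0 :: faces') (-1) = some ((f0 :: faces').getLastD (0, "")) := by
    rw [PySem.List.pyGet?_neg_one, List.getLastD_eq_getLast?,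
      List.getLast?_eq_some_getLast (List.cons_ne_nil _ _)]
    rfl
  rw [h0, hl]
  dsimp only
  rcases hcase with hskip | hmax
  · exact loopA_eq_mainB (f0 :: faces') _ skip hskip
      ((((f0 :: faces').getLastD (0, "")).1 - f0.1).toNat) f0.1 0 (le_refl _)
  · simp only [List.headD] at hmax
    rw [portALoop.eq_def, dif_neg (by omega)]
    rw [portBMain]
    rw [portBGap.eq_def, dif_neg (by omega)]
    simp [List.getLastD_eq_getLast?] at hmax ⊢
    omega
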